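-- pv_equiv track=rewrite | github.com/hitbox/scratch | pygame/polygon_wrap.py | resolve_connected_lines
-- ===== SOURCE A (Python) =====
-- from collections import deque
--
-- def resolve_connected_lines(lines):
--     graph = {}
--     for line in lines:
--         graph[line] = []
--         for other_line in lines:
--             if line != other_line and do_intersect(line, other_line):
--                 graph[line].append(other_line)
--
--     visited = set()
--     groups = []
--
--     for line in lines:
--         if line in visited:
--             continue
--         group = []
--         queue = deque([line])
--         while queue:
--             current_line = queue.popleft()
--             group.append(current_line)
--             visited.add(current_line)
--             for neighbor in graph[current_line]:
--                 if neighbor not in visited: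
--                     queue.append(neighbor)
--         groups.append(group)
--
--     return groups
--
-- def do_intersect(line1, line2):
--     # endpoints are connected
--     return set(line1).intersection(line2)
-- ===== SOURCE B (Python) =====
-- def resolve_connected_lines(lines):
--     # Index endpoints -> indices of the lines touching them, so adjacency is
--     # built from the index (merge of two sorted index lists) instead of an
--     # all-pairs scan; BFS uses the group list itself with a read pointer.
--     at_point = {}
--     for i, line in enumerate(lines):
--         a, b = line
--         at_point.setdefault(a, []).append(i)
--         if b != a:
--             at_point.setdefault(b, []).append(i)
--     adj = {}
--     for line in lines:
--         if line not in adj: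
--             a, b = line
--             idxs = at_point[a] if b == a else _merge(at_point[a], at_point[b])
--             adj[line] = [lines[i] for i in idxs if lines[i] != line]
--     visited = set()
--     groups = []
--     for line in lines:
--         if line in visited:
--             continue
--         group = [line]
--         i = 0
--         while i < len(group):
--             cur = group[i]
--             visited.add(cur)
--             for nb in adj[cur]:
--                 if nb not in visited:
--                     group.append(nb)
--             i += 1
--         groups.append(group)
--     return groups
--
-- def _merge(xs, ys):
--     out = []
--     i = j = 0
--     while i < len(xs) and j < len(ys):
--         if xs[i] < ys[j]:
--             out.append(xs[i]); i += 1
--         elif ys[j] < xs[i]: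
--             out.append(ys[j]); j += 1
--         else:
--             out.append(xs[i]); i += 1; j += 1
--     out.extend(xs[i:])
--     out.extend(ys[j:])
--     return out
-- ===== Notes on version B (the rewrite author's own statement) =====
-- stated objective: faster
-- what changed: Adjacency is built from an endpoint->line-indices index (one enumerate pass, then a two-pointer merge of the two sorted index lists per distinct line) instead of A's all-pairs intersection scan, and the BFS uses the group list itself with a read pointer instead of a deque.
import Mathlib
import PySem

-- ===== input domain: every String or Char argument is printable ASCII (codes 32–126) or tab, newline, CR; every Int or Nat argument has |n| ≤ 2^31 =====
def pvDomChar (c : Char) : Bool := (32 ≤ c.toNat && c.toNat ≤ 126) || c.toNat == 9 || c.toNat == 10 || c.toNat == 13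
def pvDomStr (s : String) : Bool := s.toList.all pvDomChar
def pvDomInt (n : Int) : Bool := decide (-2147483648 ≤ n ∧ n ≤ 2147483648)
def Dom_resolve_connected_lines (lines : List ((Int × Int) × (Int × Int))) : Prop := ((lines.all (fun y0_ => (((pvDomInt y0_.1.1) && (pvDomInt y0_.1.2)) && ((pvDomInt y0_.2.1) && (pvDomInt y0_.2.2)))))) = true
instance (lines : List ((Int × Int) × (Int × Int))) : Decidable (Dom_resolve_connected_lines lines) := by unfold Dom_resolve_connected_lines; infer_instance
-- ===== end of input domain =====

-- B replaces A's all-pairs adjacency construction by an endpoint→indices index whose two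
-- sorted index lists are merged two-pointer style per line; the BFS is a read-pointer loop
-- over the growing group list instead of a deque.  The return values are proved equal.

abbrev PvLine : Type := (Int × Int) × (Int × Int)

-- ===== PORT A =====
-- do_intersect(line1, line2): truthiness of set(line1).intersection(line2)
def pvDoIntersect (l1 l2 : PvLine) : Bool :=
  !(PySem.Set.inter (PySem.Set.ofList [l1.1, l1.2]) (PySem.Set.ofList [l2.1, l2.2])).isEmpty

-- graph[line] = [o for o in lines if line != o and do_intersect(line, o)], by A's two nested loops
def pvGraphA (lines : List PvLine) : PySem.Dict PvLine (List PvLine) :=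
  lines.foldl (fun g line =>
    g.insert line (lines.foldl (fun acc o =>
      if line ≠ o ∧ pvDoIntersect line o = true then acc ++ [o] else acc) [])) PySem.Dict.empty

-- A's BFS loop: 'while queue: current = queue.popleft(); …'.  The Nat argument is a fuel
-- guard making the recursion structural; the loop itself stops when the queue empties.
def pvBfsA (graph : PySem.Dict PvLine (List PvLine)) :
    Nat → List PvLine → List PvLine → PySem.Set PvLine → (List PvLine × PySem.Set PvLine)
  | 0, _, group, vis => (group, vis)
  | _ + 1, [], group, vis => (group, vis)
  | fuel + 1, c :: queue, group, vis =>
      let group := group ++ [c]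
      let vis := PySem.Set.add vis c
      let queue := (graph.getD c []).foldl
        (fun q nb => if PySem.Set.contains vis nb then q else q ++ [nb]) queue
      pvBfsA graph fuel queue group vis

def resolve_connected_lines (lines : List ((Int × Int) × (Int × Int))) : List (List ((Int × Int) × (Int × Int))) :=
  let graph := pvGraphA lines
  let fuel := (lines.length + 1) * (lines.length + 1) * (lines.length + 1)
  (lines.foldl (fun (st : List (List PvLine) × PySem.Set PvLine) line =>
    if PySem.Set.contains st.2 line then st
    else
      let r := pvBfsA graph fuel [line] [] st.2
      (st.1 ++ [r.1], r.2)) ([], PySem.Set.empty)).1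

-- ===== PORT B =====
def pvDefLine : PvLine := ((0, 0), (0, 0))

-- at_point: endpoint -> increasing list of indices of the lines touching it
-- ('for i, line in enumerate(lines)' as a fold over lines.zipIdx; setdefault+append = modify)
def pvAtPoint (lines : List PvLine) : PySem.Dict (Int × Int) (List Nat) :=
  lines.zipIdx.foldl (fun d p =>
    let d := d.modify p.1.1 [] (· ++ [p.2])
    if p.1.2 ≠ p.1.1 then d.modify p.1.2 [] (· ++ [p.2]) else d) PySem.Dict.empty

-- _merge: two-pointer merge of two sorted index lists, keeping a common element once
def pvMerge : List Nat → List Nat → List Nat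
  | [], ys => ys
  | x :: xs, [] => x :: xs
  | x :: xs, y :: ys =>
      if x < y then x :: pvMerge xs (y :: ys)
      else if y < x then y :: pvMerge (x :: xs) ys
      else x :: pvMerge xs ys
termination_by xs ys => xs.length + ys.length

-- adj[line] = [lines[i] for i in idxs if lines[i] != line]  (indices from enumerate are in range)
def pvAdjB (lines : List PvLine) : PySem.Dict PvLine (List PvLine) :=
  let ap := pvAtPoint lines
  lines.foldl (fun adj line =>
    if adj.contains line then adj
    else
      let idxs := if line.2 = line.1 then ap.getD line.1 []
                  else pvMerge (ap.getD line.1 []) (ap.getD line.2 [])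
      adj.insert line ((idxs.filter (fun i => lines.getD i pvDefLine ≠ line)).map
        (fun i => lines.getD i pvDefLine))) PySem.Dict.empty

-- B's BFS: 'while i < len(group)' read-pointer loop over the growing group list.
-- Same fuel guard as in port A; on exhaustion the processed prefix is returned.
def pvBfsB (adj : PySem.Dict PvLine (List PvLine)) :
    Nat → List PvLine → Nat → PySem.Set PvLine → (List PvLine × PySem.Set PvLine)
  | 0, group, i, vis => (group.take i, vis)
  | fuel + 1, group, i, vis =>
      if i < group.length then
        let cur := group.getD i pvDefLine
        let vis := PySem.Set.add vis cur
        let group := (adj.getD cur []).foldl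
          (fun g nb => if PySem.Set.contains vis nb then g else g ++ [nb]) group
        pvBfsB adj fuel group (i + 1) vis
      else (group, vis)

def resolve_connected_lines_alt (lines : List ((Int × Int) × (Int × Int))) : List (List ((Int × Int) × (Int × Int))) :=
  let adj := pvAdjB lines
  let fuel := (lines.length + 1) * (lines.length + 1) * (lines.length + 1)
  (lines.foldl (fun (st : List (List PvLine) × PySem.Set PvLine) line =>
    if PySem.Set.contains st.2 line then st
    else
      let r := pvBfsB adj fuel [line] 0 st.2
      (st.1 ++ [r.1], r.2)) ([], PySem.Set.empty)).1

-- ===== PRECONDITION & SPEC =====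
def Spec_resolve_connected_lines (lines : List ((Int × Int) × (Int × Int))) (out : List (List ((Int × Int) × (Int × Int)))) : Prop := out = resolve_connected_lines_alt lines
instance (lines : List ((Int × Int) × (Int × Int))) (out : List (List ((Int × Int) × (Int × Int)))) : Decidable (Spec_resolve_connected_lines lines out) := by unfold Spec_resolve_connected_lines; infer_instance

-- ===== CLAIM (what is proved, stated in full; the proofs are below) =====
def Claim_equal_resolve_connected_lines : Prop := ∀ (lines : List ((Int × Int) × (Int × Int))), Dom_resolve_connected_lines lines → Spec_resolve_connected_lines lines (resolve_connected_lines lines)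

-- ===== LEMMAS AND PROOFS =====

-- 'o shares the endpoint p' — the membership criterion of at_point[p]
def pvTouch (p : Int × Int) (o : PvLine) : Bool := o.1 = p || o.2 = p

-- the adjacency value both ports compute for a line
def pvF (lines : List PvLine) (line : PvLine) : List PvLine :=
  lines.filter (fun o => decide (line ≠ o) && pvDoIntersect line o)

theorem pvDoIntersect_eq (l o : PvLine) :
    pvDoIntersect l o = (pvTouch l.1 o || pvTouch l.2 o) := by
  obtain ⟨a, b⟩ := l
  obtain ⟨c, d⟩ := o
  rw [Bool.eq_iff_iff]
  simp only [pvDoIntersect, PySem.Set.inter, PySem.Set.contains_eq_listContains, List.contains_eq_mem,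
    PySem.Set.mem_ofList, List.mem_cons, List.not_mem_nil, or_false, Bool.decide_or, Bool.not_eq_eq_eq_not,
    Bool.not_true, List.isEmpty_eq_false_iff, ne_eq, List.filter_eq_nil_iff, Bool.or_eq_true, decide_eq_true_eq, not_or,
    forall_eq_or_imp, forall_eq, not_and, Decidable.not_not, and_imp, pvTouch]
  constructor
  · intro h
    by_cases h1 : a = c <;> by_cases h2 : a = d <;> by_cases h3 : b = c <;> by_cases h4 : b = d <;>
      simp_all
  · rintro (⟨rfl, _⟩ | h) <;> try tauto

theorem pvAtPoint_getD (lines : List PvLine) (p : Int × Int) :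
    (pvAtPoint lines).getD p [] =
      (List.range lines.length).filter (fun i => pvTouch p (lines.getD i pvDefLine)) := by
  induction lines using List.reverseRecOn with
  | nil => simp [pvAtPoint]
  | append_singleton ls y ih =>
      have hgetlast : (ls ++ [y]).getD ls.length pvDefLine = y := by
        simp [List.getD]
      have hfilter :
          (List.range ls.length).filter (fun i => pvTouch p ((ls ++ [y]).getD i pvDefLine))
            = (List.range ls.length).filter (fun i => pvTouch p (ls.getD i pvDefLine)) := by
        apply List.filter_congr
        intro i hi
        rw [List.getD, List.getD, List.getElem?_append_left (List.mem_range.mp hi)]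
      have hstep : pvAtPoint (ls ++ [y]) =
          (if y.2 ≠ y.1 then
            ((pvAtPoint ls).modify y.1 [] (· ++ [ls.length])).modify y.2 [] (· ++ [ls.length])
           else (pvAtPoint ls).modify y.1 [] (· ++ [ls.length])) := by
        simp [pvAtPoint, List.zipIdx_append, List.foldl_append]
      rw [hstep, List.length_append, List.length_singleton, List.range_succ,
        List.filter_append, hfilter, List.filter_singleton, hgetlast]
      clear hstep hfilter hgetlast
      by_cases hy : y.2 = y.1
      · rw [if_neg (by simp [hy])]
        simp only [PySem.Dict.getD_modify]
        split_ifs <;> simp_all [pvTouch, Bool.cond_eq_ite, eq_comm]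
      · rw [if_pos hy]
        simp only [PySem.Dict.getD_modify]
        split_ifs <;> simp_all [pvTouch, Bool.cond_eq_ite, eq_comm]

theorem pvMerge_nil_right (xs : List Nat) : pvMerge xs [] = xs := by
  cases xs <;> simp [pvMerge]

theorem pvMerge_cons_left (x : Nat) (xs ys : List Nat) (h : ∀ y ∈ ys, x < y) :
    pvMerge (x :: xs) ys = x :: pvMerge xs ys := by
  cases ys with
  | nil => simp [pvMerge_nil_right]
  | cons y ys => simp [pvMerge, h y (List.mem_cons_self ..)]

theorem pvMerge_cons_right (y : Nat) (xs ys : List Nat) (h : ∀ x ∈ xs, y < x) :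
    pvMerge xs (y :: ys) = y :: pvMerge xs ys := by
  cases xs with
  | nil => simp [pvMerge]
  | cons x xs =>
      have hx := h x (List.mem_cons_self ..)
      simp [pvMerge, hx, Nat.not_lt_of_lt hx]

theorem pvMerge_filter (l : List Nat) (hl : l.Pairwise (· < ·)) (p q : Nat → Bool) :
    pvMerge (l.filter p) (l.filter q) = l.filter (fun i => p i || q i) := by
  induction l with
  | nil => simp [pvMerge]
  | cons i rest ih =>
      rw [List.pairwise_cons] at hl
      have hlt : ∀ j ∈ rest, i < j := hl.1
      have ih' := ih hl.2
      have hp' : ∀ j ∈ rest.filter p, i < j := fun j hj => hlt j (List.mem_of_mem_filter hj)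
      have hq' : ∀ j ∈ rest.filter q, i < j := fun j hj => hlt j (List.mem_of_mem_filter hj)
      by_cases hp : p i <;> by_cases hq : q i
      · simp only [List.filter_cons, hp, hq, if_pos, Bool.or_self]
        simp [pvMerge, ih']
      · simp only [List.filter_cons, hp, hq, if_false, Bool.false_eq_true,
          Bool.or_false, ite_true]
        rw [pvMerge_cons_left i _ _ hq']
        simp [ih']
      · simp only [List.filter_cons, hp, hq, if_true, if_false, Bool.false_eq_true,
          Bool.false_or]
        rw [pvMerge_cons_right i _ _ hp']
        simp [ih']
      · simp [hp, hq, ih']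

theorem pvMapRange {α : Type} (l : List α) (d0 : α) (P : α → Bool) :
    ((List.range l.length).filter (fun i => P (l.getD i d0))).map (fun i => l.getD i d0)
      = l.filter P := by
  induction l using List.reverseRecOn with
  | nil => simp
  | append_singleton ls y ih =>
      have hgetlast : (ls ++ [y]).getD ls.length d0 = y := by simp [List.getD]
      have hget : ∀ i ∈ List.range ls.length, (ls ++ [y]).getD i d0 = ls.getD i d0 := by
        intro i hi
        rw [List.getD, List.getD, List.getElem?_append_left (List.mem_range.mp hi)]
      rw [List.length_append, List.length_singleton, List.range_succ, List.filter_append,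
        List.filter_congr (fun i hi => by rw [hget i hi]), List.map_append,
        List.filter_singleton, hgetlast, List.filter_append, List.filter_singleton]
      congr 1
      · rw [← ih]
        apply List.map_congr_left
        intro i hi
        exact hget i (List.mem_of_mem_filter hi)
      · by_cases hP : P y <;> simp [hP]

theorem pvGetD_foldl_insert_not_mem {κ ν : Type} [BEq κ] [LawfulBEq κ] [DecidableEq κ]
    (l : List κ) (F : κ → ν) (d0 : ν) (k : κ) (hk : ∀ x ∈ l, x ≠ k) :
    ∀ (d : PySem.Dict κ ν),
      (l.foldl (fun d x => d.insert x (F x)) d).getD k d0 = d.getD k d0 := by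
  induction l with
  | nil => simp
  | cons z zs ih =>
      intro d
      simp only [List.foldl_cons]
      rw [ih (fun x hx => hk x (List.mem_cons_of_mem _ hx)),
        PySem.Dict.getD_insert, if_neg (Ne.symm (hk z (List.mem_cons_self ..)))]

theorem pvGetD_foldl_insert {κ ν : Type} [BEq κ] [LawfulBEq κ] [DecidableEq κ]
    (l : List κ) (F : κ → ν) (d0 : ν) :
    ∀ (d : PySem.Dict κ ν) (k : κ), k ∈ l →
      (l.foldl (fun d x => d.insert x (F x)) d).getD k d0 = F k := by
  induction l with
  | nil => simp
  | cons x xs ih =>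
      intro d k hk
      simp only [List.foldl_cons]
      by_cases hx : k ∈ xs
      · exact ih _ k hx
      · have hkx : k = x := by rcases List.mem_cons.mp hk with h | h; exact h; exact absurd h hx
        subst hkx
        rw [pvGetD_foldl_insert_not_mem xs F d0 k (fun x' hx' h => hx (h ▸ hx')),
          PySem.Dict.getD_insert, if_pos rfl]

theorem pvGuardFold_not_mem {κ ν : Type} [BEq κ] [LawfulBEq κ] [DecidableEq κ]
    (l : List κ) (F : κ → ν) (d0 : ν) (k : κ) (hk : ∀ x ∈ l, x ≠ k) :
    ∀ (d : PySem.Dict κ ν),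
      ((l.foldl (fun d x => if d.contains x then d else d.insert x (F x)) d).getD k d0
          = d.getD k d0 ∧
       (l.foldl (fun d x => if d.contains x then d else d.insert x (F x)) d).contains k
          = d.contains k) := by
  induction l with
  | nil => simp
  | cons z zs ih =>
      intro d
      simp only [List.foldl_cons]
      have hzk := hk z (List.mem_cons_self ..)
      have hrec := ih (fun x hx => hk x (List.mem_cons_of_mem _ hx))
        (if d.contains z then d else d.insert z (F z))
      refine ⟨?_, ?_⟩
      · rw [hrec.1]
        by_cases hc : d.contains z
        · rw [if_pos hc]
        · rw [if_neg hc, PySem.Dict.getD_insert, if_neg (Ne.symm hzk)]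
      · rw [hrec.2]
        by_cases hc : d.contains z
        · rw [if_pos hc]
        · rw [if_neg hc, PySem.Dict.contains_insert]
          simp [beq_iff_eq, Ne.symm hzk]

theorem pvGetD_foldl_insert_guard {κ ν : Type} [BEq κ] [LawfulBEq κ] [DecidableEq κ]
    (l : List κ) (F : κ → ν) (d0 : ν) :
    ∀ (d : PySem.Dict κ ν) (k : κ), k ∈ l →
      (l.foldl (fun d x => if d.contains x then d else d.insert x (F x)) d).getD k d0
        = if d.contains k then d.getD k d0 else F k := by
  induction l with
  | nil => simp
  | cons x xs ih =>
      intro d k hk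
      simp only [List.foldl_cons]
      by_cases hxk : k ∈ xs
      · by_cases hc : d.contains x
        · rw [if_pos hc]; exact ih d k hxk
        · rw [if_neg hc, ih _ k hxk, PySem.Dict.contains_insert, PySem.Dict.getD_insert]
          by_cases hkx : k = x
          · simp [hkx, hc]
          · simp [hkx, beq_iff_eq]
      · have hkx : k = x := by rcases List.mem_cons.mp hk with h | h; exact h; exact absurd h hxk
        subst hkx
        have hne : ∀ x' ∈ xs, x' ≠ k := fun x' hx' h => hxk (h ▸ hx')
        by_cases hc : d.contains k
        · rw [if_pos hc, (pvGuardFold_not_mem xs F d0 k hne d).1, if_pos hc]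
        · rw [if_neg hc, (pvGuardFold_not_mem xs F d0 k hne _).1,
            PySem.Dict.getD_insert, if_pos rfl, if_neg hc]

theorem pvGraphA_getD (lines : List PvLine) (line : PvLine) (h : line ∈ lines) :
    (pvGraphA lines).getD line [] = pvF lines line := by
  have hfun : ∀ l : PvLine,
      (lines.foldl (fun acc o =>
        if l ≠ o ∧ pvDoIntersect l o = true then acc ++ [o] else acc) []) = pvF lines l := by
    intro l
    have : (fun (acc : List PvLine) o =>
        if l ≠ o ∧ pvDoIntersect l o = true then acc ++ [o] else acc)
        = (fun acc o => if (decide (l ≠ o) && pvDoIntersect l o) = true then acc ++ [o] else acc) := by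
      funext acc o
      split_ifs with h1 h2 <;> simp_all
    rw [this, PySem.List.foldl_append_if (fun o => decide (l ≠ o) && pvDoIntersect l o)
      (fun o => o) lines []]
    simp [pvF]
  unfold pvGraphA
  have := pvGetD_foldl_insert lines
    (fun l => lines.foldl (fun acc o =>
      if l ≠ o ∧ pvDoIntersect l o = true then acc ++ [o] else acc) []) ([] : List PvLine)
    PySem.Dict.empty line h
  exact this.trans (hfun line)

theorem pvAdjB_getD (lines : List PvLine) (line : PvLine) (h : line ∈ lines) :
    (pvAdjB lines).getD line [] = pvF lines line := by
  unfold pvAdjB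
  rw [pvGetD_foldl_insert_guard lines _ ([] : List PvLine) PySem.Dict.empty line h,
    if_neg (by simp [PySem.Dict.contains_empty])]
  have hidx : (if line.2 = line.1 then (pvAtPoint lines).getD line.1 []
      else pvMerge ((pvAtPoint lines).getD line.1 []) ((pvAtPoint lines).getD line.2 []))
      = (List.range lines.length).filter
          (fun i => pvTouch line.1 (lines.getD i pvDefLine) || pvTouch line.2 (lines.getD i pvDefLine)) := by
    by_cases hy : line.2 = line.1
    · rw [if_pos hy, pvAtPoint_getD]
      exact (List.filter_congr (fun i _ => by rw [hy, Bool.or_self])).symm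
    · rw [if_neg hy, pvAtPoint_getD, pvAtPoint_getD,
        pvMerge_filter _ (List.pairwise_lt_range) _ _]
  rw [hidx, List.filter_filter, pvMapRange lines pvDefLine
      (fun o => decide (o ≠ line) && (pvTouch line.1 o || pvTouch line.2 o))]
  apply List.filter_congr
  intro o _
  rw [pvDoIntersect_eq]
  simp [ne_comm, Bool.and_comm]

theorem pvFoldlEnq (vis : PySem.Set PvLine) (l acc : List PvLine) :
    l.foldl (fun q nb => if PySem.Set.contains vis nb then q else q ++ [nb]) acc
      = acc ++ l.filter (fun nb => !PySem.Set.contains vis nb) := by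
  have hshape : (fun (q : List PvLine) nb => if PySem.Set.contains vis nb then q else q ++ [nb])
      = (fun q nb => if (!PySem.Set.contains vis nb) = true then q ++ [nb] else q) := by
    funext q nb
    by_cases hc : PySem.Set.contains vis nb <;> simp
  rw [hshape, PySem.List.foldl_append_if (fun nb => !PySem.Set.contains vis nb) (fun x => x) l acc]
  simp

theorem pvBfs_bisim (g1 g2 : PySem.Dict PvLine (List PvLine)) (S : List PvLine)
    (hS : ∀ c ∈ S, g1.getD c [] = g2.getD c [] ∧ ∀ nb ∈ g1.getD c [], nb ∈ S) :
    ∀ (f : Nat) (queue grp : List PvLine) (vis : PySem.Set PvLine),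
      (∀ c ∈ queue, c ∈ S) →
      pvBfsA g1 f queue grp vis = pvBfsB g2 f (grp ++ queue) grp.length vis := by
  intro f
  induction f with
  | zero => intro queue grp vis _; simp [pvBfsA, pvBfsB]
  | succ f ih =>
      intro queue grp vis hq
      cases queue with
      | nil =>
          rw [pvBfsA, pvBfsB, List.append_nil, if_neg (lt_irrefl _)]
      | cons c q =>
          rw [pvBfsA, pvBfsB, if_pos (by simp)]
          have hcur : (grp ++ c :: q).getD grp.length pvDefLine = c := by
            rw [List.getD, List.getElem?_append_right (le_refl _)]
            simp
          have hcS := hq c (List.mem_cons_self ..)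
          have hadj := (hS c hcS).1
          simp only [hcur, ← hadj]
          rw [pvFoldlEnq, pvFoldlEnq]
          rw [ih (q ++ (g1.getD c []).filter (fun nb => !PySem.Set.contains (PySem.Set.add vis c) nb))
              (grp ++ [c]) (PySem.Set.add vis c) ?_]
          · congr 1 <;> simp
          · intro x hx
            rcases List.mem_append.mp hx with hx | hx
            · exact hq x (List.mem_cons_of_mem _ hx)
            · exact (hS c hcS).2 x (List.mem_of_mem_filter hx)

theorem pv_final (lines : List ((Int × Int) × (Int × Int))) :
    resolve_connected_lines lines = resolve_connected_lines_alt lines := by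
  simp only [resolve_connected_lines, resolve_connected_lines_alt]
  have hS : ∀ c ∈ lines, (pvGraphA lines).getD c [] = (pvAdjB lines).getD c [] ∧
      ∀ nb ∈ (pvGraphA lines).getD c [], nb ∈ lines := by
    intro c hc
    refine ⟨(pvGraphA_getD _ _ hc).trans (pvAdjB_getD _ _ hc).symm, ?_⟩
    intro nb hnb
    rw [pvGraphA_getD _ _ hc] at hnb
    unfold pvF at hnb
    exact List.mem_of_mem_filter hnb
  have hfold := PySem.List.foldl_congr_mem lines
    (fun (st : List (List PvLine) × PySem.Set PvLine) line =>
      if PySem.Set.contains st.2 line then st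
      else
        ((st.1 ++ [(pvBfsA (pvGraphA lines)
            ((lines.length + 1) * (lines.length + 1) * (lines.length + 1)) [line] [] st.2).1],
          (pvBfsA (pvGraphA lines)
            ((lines.length + 1) * (lines.length + 1) * (lines.length + 1)) [line] [] st.2).2)))
    (fun (st : List (List PvLine) × PySem.Set PvLine) line =>
      if PySem.Set.contains st.2 line then st
      else
        ((st.1 ++ [(pvBfsB (pvAdjB lines)
            ((lines.length + 1) * (lines.length + 1) * (lines.length + 1)) [line] 0 st.2).1],
          (pvBfsB (pvAdjB lines)
            ((lines.length + 1) * (lines.length + 1) * (lines.length + 1)) [line] 0 st.2).2)))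
    ([], PySem.Set.empty)
    (by
      intro acc line hl
      dsimp only
      by_cases hc : PySem.Set.contains acc.2 line = true
      · rw [if_pos hc, if_pos hc]
      · have hb := pvBfs_bisim (pvGraphA lines) (pvAdjB lines) lines hS
          ((lines.length + 1) * (lines.length + 1) * (lines.length + 1)) [line] [] acc.2
          (by intro x hx; rw [List.mem_singleton] at hx; exact hx ▸ hl)
        simp only [List.nil_append, List.length_nil] at hb
        rw [if_neg hc, if_neg hc, hb])
  rw [hfold]

-- ===== VERDICT (by name: the statement is the Claim_ definition above) =====
theorem resolve_connected_lines_spec : Claim_equal_resolve_connected_lines := by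
  intro lines _
  unfold Spec_resolve_connected_lines
  exact pv_final lines
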